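-- pv_equiv track=rewrite | github.com/ChoSangHyeon/algoisthm | 12/quiz12_37.py | boobun
-- ===== SOURCE A (Python) =====
-- def boobun(input):
--     res = []
--     input.sort()
--     def zip(x):
--         if x:
--             res.append(x)
--         if len(x) == len(input):
--             return
--         for i in input:
--             if len(x)==0 or x[-1]<i:
--                 zip(x+[i])
--     zip([])
--     res.append([])
--     return res
-- ===== SOURCE B (Python) =====
-- def boobun(input):
--     input.sort()
--     res = []
--     stack = [[i] for i in input]
--     stack.reverse()
--     while stack:
--         x = stack.pop()
--         res.append(x)
--         children = [x + [i] for i in input if x[-1] < i]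
--         for c in reversed(children):
--             stack.append(c)
--     res.append([])
--     return res
-- ===== Notes on version B (the rewrite author's own statement) =====
-- stated objective: alternative
-- what changed: Replaced the nested recursive DFS (closure appending into res) by an iterative explicit-stack preorder traversal that pops a sequence, emits it, and pushes its strict extensions in reverse.
import Mathlib
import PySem

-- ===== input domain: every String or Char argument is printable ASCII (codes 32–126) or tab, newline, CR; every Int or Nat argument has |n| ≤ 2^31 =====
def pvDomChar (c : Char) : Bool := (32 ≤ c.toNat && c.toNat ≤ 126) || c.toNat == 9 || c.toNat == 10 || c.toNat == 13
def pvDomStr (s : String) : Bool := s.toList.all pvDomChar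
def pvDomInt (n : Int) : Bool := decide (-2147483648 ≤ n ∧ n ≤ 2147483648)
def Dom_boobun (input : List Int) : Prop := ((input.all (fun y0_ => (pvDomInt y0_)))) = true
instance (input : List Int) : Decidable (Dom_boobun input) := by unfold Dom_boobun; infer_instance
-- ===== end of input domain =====

-- B replaces A's nested recursive DFS (a closure appending into res) by an iterative
-- explicit-stack preorder traversal with the same output order; both sort `input` in place
-- (the caller-visible mutation is identical; the equivalence proved is about the return value).


-- lemmas the ports cite by name for termination / fuel sufficiency
theorem pvFilterLtLen (s : List Int) (i : Int) (hi : i ∈ s) :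
    (s.filter (fun j => decide (i < j))).length < s.length :=
  List.length_filter_lt_length_iff_exists.mpr ⟨i, hi, by simp⟩

theorem pvFilterTrans (I : List Int) (l i : Int)
    (hi : i ∈ I.filter (fun j => decide (l < j))) :
    I.filter (fun j => decide (i < j)) =
      (I.filter (fun j => decide (l < j))).filter (fun j => decide (i < j)) := by
  have hl : l < i := by simpa using (List.mem_filter.mp hi).2
  rw [List.filter_filter]
  refine (List.filter_congr ?_).symm
  intro j _
  by_cases h : i < j
  · simp [h, hl.trans h]
  · simp [h]

-- the DFS-stack measure decreases when a sequence is popped and its children pushed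
theorem pvMeasureLt (input : List Int) (x : List Int) (rest : List (List Int)) :
    ((((input.filter (fun i => decide (x.getLastD 0 < i))).map (fun i => x ++ [i])) ++ rest).map
      (fun y => (input.length + 1) ^ ((input.filter (fun j => decide (y.getLastD 0 < j))).length))).sum
    < ((x :: rest).map
      (fun y => (input.length + 1) ^ ((input.filter (fun j => decide (y.getLastD 0 < j))).length))).sum := by
  rw [List.map_append, List.sum_append, List.map_cons, List.sum_cons, List.map_map]
  have hkey : ∀ i ∈ input.filter (fun j => decide (x.getLastD 0 < j)),
      ((fun y => (input.length + 1) ^ ((input.filter (fun j => decide (y.getLastD 0 < j))).length))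
        ∘ (fun i => x ++ [i])) i
      ≤ (input.length + 1) ^ ((input.filter (fun j => decide (x.getLastD 0 < j))).length - 1) := by
    intro i hi
    have h1 : (x ++ [i]).getLastD 0 = i := by simp
    simp only [Function.comp_apply, h1]
    rw [pvFilterTrans input (x.getLastD 0) i hi]
    exact Nat.pow_le_pow_right (by omega)
      (by have := pvFilterLtLen (input.filter (fun j => decide (x.getLastD 0 < j))) i hi; omega)
  have hsum := List.sum_le_sum hkey
  rw [List.map_const', List.sum_replicate, smul_eq_mul] at hsum
  have hflen : (input.filter (fun j => decide (x.getLastD 0 < j))).length ≤ input.length :=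
    List.length_filter_le _ _
  have hlt : (input.filter (fun j => decide (x.getLastD 0 < j))).length *
      (input.length + 1) ^ ((input.filter (fun j => decide (x.getLastD 0 < j))).length - 1)
      < (input.length + 1) ^ ((input.filter (fun j => decide (x.getLastD 0 < j))).length) := by
    rcases Nat.eq_zero_or_pos (input.filter (fun j => decide (x.getLastD 0 < j))).length with h0 | h0
    · rw [h0]; simp
    · calc (input.filter (fun j => decide (x.getLastD 0 < j))).length *
            (input.length + 1) ^ ((input.filter (fun j => decide (x.getLastD 0 < j))).length - 1)
          ≤ input.length *
            (input.length + 1) ^ ((input.filter (fun j => decide (x.getLastD 0 < j))).length - 1) :=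
            Nat.mul_le_mul_right _ hflen
        _ < (input.length + 1) *
            (input.length + 1) ^ ((input.filter (fun j => decide (x.getLastD 0 < j))).length - 1) :=
            (Nat.mul_lt_mul_right (Nat.pow_pos (by omega))).mpr (by omega)
        _ = (input.length + 1) ^ ((input.filter (fun j => decide (x.getLastD 0 < j))).length) := by
            rw [← Nat.pow_succ']; congr 1; omega
  omega

-- ===== PORT A =====
-- A's inner recursive `zip`, with a fuel guard only to make the same recursion total;
-- `fuel = input.length + 1 - x.length` stays positive on every call A makes (proved below).
def zipA : Nat → List Int → List Int → List (List Int) → List (List Int)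
  | 0, _, _, res => res
  | fuel + 1, input, x, res =>
    let res1 := if x.isEmpty then res else res ++ [x]
    if x.length = input.length then res1
    else
      input.foldl
        (fun r i =>
          if x.isEmpty || decide (x.getLastD 0 < i) then zipA fuel input (x ++ [i]) r else r)
        res1

def boobun (input : List Int) : List (List Int) :=
  let inp := PySem.List.sorted input (fun v => v) false
  zipA (inp.length + 1) inp [] [] ++ [[]]

-- ===== PORT B =====
-- B's while-loop over an explicit stack (list head = top of stack); every stack element is
-- nonempty, so `x.getLastD 0` is exactly Python's `x[-1]` on every state the loop reaches.
def loopB (input : List Int) (stack : List (List Int)) (res : List (List Int)) :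
    List (List Int) :=
  match stack with
  | [] => res
  | x :: rest =>
    loopB input
      (((input.filter (fun i => decide (x.getLastD 0 < i))).map (fun i => x ++ [i])) ++ rest)
      (res ++ [x])
termination_by
  (stack.map (fun y =>
    (input.length + 1) ^ ((input.filter (fun j => decide (y.getLastD 0 < j))).length))).sum
decreasing_by
  rw [List.map_subtype (g := fun (i : Int) => x ++ [i]) (fun a h => rfl),
      List.unattach_filter (g := fun (i : Int) => decide (x.getLastD 0 < i)) (hf := fun a h => rfl),
      List.unattach_attach]
  exact pvMeasureLt input x rest

def boobun_alt (input : List Int) : List (List Int) :=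
  let inp := PySem.List.sorted input (fun v => v) false
  loopB inp (inp.map (fun i => [i])) [] ++ [[]]

-- ===== PRECONDITION & SPEC =====
def Spec_boobun (input : List Int) (out : List (List Int)) : Prop := out = boobun_alt input
instance (input : List Int) (out : List (List Int)) : Decidable (Spec_boobun input out) := by unfold Spec_boobun; infer_instance

-- ===== CLAIM (what is proved, stated in full; the proofs are below) =====
def Claim_equal_boobun : Prop := ∀ (input : List Int), Dom_boobun input → Spec_boobun input (boobun input)

-- ===== LEMMAS AND PROOFS =====

-- preorder of the extension tree rooted at x: the common semantics of both traversals
def pre (I : List Int) (x : List Int) : List (List Int) :=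
  x :: (I.filter (fun j => decide (x.getLastD 0 < j))).attach.flatMap
        (fun p => pre I (x ++ [p.1]))
termination_by (I.filter (fun j => decide (x.getLastD 0 < j))).length
decreasing_by
  have h1 : (x ++ [p.1]).getLastD 0 = p.1 := by simp
  rw [h1, pvFilterTrans I (x.getLastD 0) p.1 p.2]
  exact pvFilterLtLen _ _ p.2

theorem pre_unfold (I : List Int) (x : List Int) :
    pre I x = x :: (I.filter (fun j => decide (x.getLastD 0 < j))).flatMap
        (fun i => pre I (x ++ [i])) := by
  rw [pre]
  congr 1
  conv_rhs => rw [← List.attach_map_subtype_val (I.filter (fun j => decide (x.getLastD 0 < j)))]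
  rw [List.flatMap_map]

theorem foldl_zip (I : List Int) (f : Nat) (x : List Int) :
    ∀ (L : List Int) (r0 : List (List Int)),
      (∀ i ∈ L, (x.isEmpty || decide (x.getLastD 0 < i)) = true →
        ∀ r, zipA f I (x ++ [i]) r = r ++ pre I (x ++ [i])) →
      L.foldl
        (fun r i =>
          if x.isEmpty || decide (x.getLastD 0 < i) then zipA f I (x ++ [i]) r else r) r0
        = r0 ++ (L.filter (fun i => x.isEmpty || decide (x.getLastD 0 < i))).flatMap
            (fun i => pre I (x ++ [i])) := by
  intro L
  induction L with
  | nil => intro r0 _; simp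
  | cons a L ih =>
    intro r0 h
    simp only [List.foldl_cons, List.filter_cons]
    by_cases hc : (x.isEmpty || decide (x.getLastD 0 < a)) = true
    · rw [if_pos hc, h a (by simp) hc r0, ih _ (fun i hi => h i (by simp [hi])), hc]
      simp
    · have hc' : (x.isEmpty || decide (x.getLastD 0 < a)) = false := by
        rcases Bool.eq_false_or_eq_true (x.isEmpty || decide (x.getLastD 0 < a)) with h' | h'
        · exact absurd h' hc
        · exact h'
      rw [if_neg hc, ih _ (fun i hi => h i (by simp [hi])), hc']
      simp

theorem zipA_pre (I : List Int) :
    ∀ (fuel : Nat) (x : List Int) (res : List (List Int)), x ≠ [] →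
      x.length + (I.filter (fun j => decide (x.getLastD 0 < j))).length ≤ I.length →
      I.length < x.length + fuel →
      zipA fuel I x res = res ++ pre I x := by
  intro fuel
  induction fuel with
  | zero => intro x res _ h1 h2; omega
  | succ f ih =>
    intro x res hx h1 h2
    have hxe : x.isEmpty = false := by simpa using hx
    simp only [zipA]
    rw [if_neg (show ¬ (x.isEmpty = true) by simp [hxe])]
    by_cases hlen : x.length = I.length
    · have h0 : (I.filter (fun j => decide (x.getLastD 0 < j))).length = 0 := by omega
      rw [if_pos hlen, pre_unfold, List.length_eq_zero_iff.mp h0]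
      simp
    · rw [if_neg hlen, foldl_zip I f x I]
      · rw [pre_unfold]
        have hfe : (I.filter (fun i => x.isEmpty || decide (x.getLastD 0 < i)))
            = I.filter (fun j => decide (x.getLastD 0 < j)) := by
          simp [hxe]
        rw [hfe]
        simp
      · intro i hi hc r
        have hli : decide (x.getLastD 0 < i) = true := by simpa [hxe] using hc
        have his : i ∈ I.filter (fun j => decide (x.getLastD 0 < j)) :=
          List.mem_filter.mpr ⟨hi, hli⟩
        apply ih
        · simp
        · have hlast : (x ++ [i]).getLastD 0 = i := by simp
          rw [hlast, pvFilterTrans I (x.getLastD 0) i his]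
          have := pvFilterLtLen (I.filter (fun j => decide (x.getLastD 0 < j))) i his
          simp only [List.length_append, List.length_cons, List.length_nil]
          omega
        · simp only [List.length_append, List.length_cons, List.length_nil]
          omega

theorem loopB_pre (I : List Int) (stack res : List (List Int)) :
    loopB I stack res = res ++ stack.flatMap (fun x => pre I x) := by
  fun_induction loopB I stack res with
  | case1 res => simp
  | case2 res x rest ih =>
    rw [List.map_subtype (g := fun (i : Int) => x ++ [i]) (fun a h => rfl),
        List.unattach_filter (g := fun (i : Int) => decide (x.getLastD 0 < i)) (hf := fun a h => rfl),
        List.unattach_attach] at ih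
    rw [ih, List.flatMap_cons, pre_unfold]
    simp [List.flatMap_append, List.flatMap_map]

theorem boobun_eq (input : List Int) : boobun input = boobun_alt input := by
  unfold boobun boobun_alt
  dsimp only
  set inp := PySem.List.sorted input (fun v => v) false with hinp
  congr 1
  rw [loopB_pre, List.nil_append, List.flatMap_map]
  cases hI : inp with
  | nil => simp [zipA]
  | cons a t =>
    rw [← hI]
    have hlp : ¬ (List.length ([] : List Int) = inp.length) := by simp [hI]
    simp only [zipA]
    rw [if_pos (show (([] : List Int).isEmpty) = true from rfl), if_neg hlp,
        foldl_zip inp inp.length ([] : List Int) inp]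
    · simp
    · intro i hi _ r
      apply zipA_pre
      · simp
      · have hlast : (([] : List Int) ++ [i]).getLastD 0 = i := by simp
        rw [hlast]
        have := pvFilterLtLen inp i hi
        simp only [List.length_append, List.length_cons, List.length_nil]
        omega
      · simp

-- ===== VERDICT (by name: the statement is the Claim_ definition above) =====
theorem boobun_spec : Claim_equal_boobun := by
  intro input _
  exact boobun_eq input
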